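-- pv_equiv track=rewrite | github.com/ksumini/Algorithm-Study2.0 | Programmers/숫자 타자 대회/yerin.py | measure_distance
-- ===== SOURCE A (Python) =====
-- from collections import deque, defaultdict
--
-- def measure_distance(start, end):
--     n, m = 4, 3
--     q = deque([(start, 0)])
--     diagonal = [(1, 1), (1, -1), (-1, 1), (-1, -1)]
--     visited = set()
--     ex, ey = end
--
--     while q:
--         (x, y), dist = q.popleft()
--
--         if (x, y) == (ex, ey):
--             return dist
--
--         # 탐색하는 경로 줄이기
--         if x == ex:  # 목표 지점이 현재 위치와 같은 행
--             directions = [(0, 1), (0, -1)]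
--         elif x < ex:  # 목표 지점이 현재 위치보다 아래에 있을 때
--             directions = [(1, 0), (1, 1), (1, -1)]
--         else:  # 목표 지점이 현재 위치보다 위에 있을 때
--             directions = [(-1, 0), (-1, 1), (-1, -1)]
--
--         for dx, dy in directions:
--             nx, ny = x + dx, y + dy
--             if 0 <= nx < n and 0 <= ny < m and (nx, ny) not in visited:
--                 visited.add((nx, ny))
--                 if (dx, dy) in diagonal:
--                     q.append(((nx, ny), dist + 3))
--                 else:
--                     q.append(((nx, ny), dist + 2))
-- ===== SOURCE B (Python) =====
-- def measure_distance(start, end):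
--     sx, sy = start
--     ex, ey = end
--     if 0 <= sx < 4 and 0 <= sy < 3 and 0 <= ex < 4 and 0 <= ey < 3:
--         dr, dc = abs(ex - sx), abs(ey - sy)
--         return 2 * max(dr, dc) + min(dr, dc)
--     return None
-- ===== Notes on version B (the rewrite author's own statement) =====
-- stated objective: simpler
-- what changed: Replaces the pruned BFS (deque + visited set over the 4x3 grid) with the closed-form minimal cost 2*max(dr,dc)+min(dr,dc) guarded by an explicit keypad-validity check.
-- intended difference: For starts off the 4x3 keypad that either equal the end or lie one step off the pad with the end on it, A's BFS still returns a move cost (0 or the travel cost); B returns None, the intended result for an invalid start key. — e.g. on measure_distance((-1, 0), (0, 0)): A returns some 2, B returns none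
import Mathlib
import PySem

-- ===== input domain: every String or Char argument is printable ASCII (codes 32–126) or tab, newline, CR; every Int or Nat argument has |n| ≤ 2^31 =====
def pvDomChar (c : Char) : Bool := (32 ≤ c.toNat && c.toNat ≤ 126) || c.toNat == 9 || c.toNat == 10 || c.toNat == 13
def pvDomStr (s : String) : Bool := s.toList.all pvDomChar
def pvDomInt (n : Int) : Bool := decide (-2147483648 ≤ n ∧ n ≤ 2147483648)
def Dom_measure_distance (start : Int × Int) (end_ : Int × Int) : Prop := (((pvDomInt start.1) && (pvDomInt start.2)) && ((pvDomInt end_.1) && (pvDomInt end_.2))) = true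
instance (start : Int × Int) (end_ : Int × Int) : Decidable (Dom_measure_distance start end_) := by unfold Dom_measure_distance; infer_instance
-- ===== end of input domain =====

-- B replaces A's pruned BFS with the closed-form cost 2*max+min on the 4x3 keypad (None off it);
-- return-value equivalence outside D_, where A's BFS accidentally returns counts for off-keypad starts.

-- ===== PORT A =====
-- literal port of A's BFS: deque -> List, set() -> PySem.Set, while q -> fuel recursion.
-- Fuel 20 is a totality guard only: the loop pops at most 13 times (1 start + at most 12
-- visited grid cells ever enqueued); the proofs below never return through the fuel-0 branch.
def pvDiagonal : List (Int × Int) := [(1, 1), (1, -1), (-1, 1), (-1, -1)]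

-- the inner 'for dx, dy in directions' loop: filters neighbours into the queue and visited set
def mdStep (x y dist : Int) (q : List ((Int × Int) × Int)) (visited : PySem.Set (Int × Int))
    (directions : List (Int × Int)) : List ((Int × Int) × Int) × PySem.Set (Int × Int) :=
  directions.foldl
    (fun acc d =>
      let nx := x + d.1
      let ny := y + d.2
      if 0 ≤ nx ∧ nx < 4 ∧ 0 ≤ ny ∧ ny < 3 ∧ ¬ (PySem.Set.contains acc.2 (nx, ny) = true) then
        (acc.1 ++ [((nx, ny), dist + (if d ∈ pvDiagonal then 3 else 2))],
         PySem.Set.add acc.2 (nx, ny))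
      else acc)
    (q, visited)

-- the 'while q' loop
def mdLoop (e : Int × Int) : Nat → List ((Int × Int) × Int) → PySem.Set (Int × Int) → Option Int
  | 0, _, _ => none
  | _ + 1, [], _ => none
  | fuel + 1, ((x, y), dist) :: rest, visited =>
      if (x, y) = e then some dist
      else
        let directions : List (Int × Int) :=
          if x = e.1 then [(0, 1), (0, -1)]
          else if x < e.1 then [(1, 0), (1, 1), (1, -1)]
          else [(-1, 0), (-1, 1), (-1, -1)]
        let st := mdStep x y dist rest visited directions
        mdLoop e fuel st.1 st.2

def measure_distance (start : Int × Int) (end_ : Int × Int) : Option Int :=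
  mdLoop end_ 20 [(start, 0)] PySem.Set.empty

-- ===== PORT B =====
def measure_distance_alt (start : Int × Int) (end_ : Int × Int) : Option Int :=
  if 0 ≤ start.1 ∧ start.1 < 4 ∧ 0 ≤ start.2 ∧ start.2 < 3 ∧
     0 ≤ end_.1 ∧ end_.1 < 4 ∧ 0 ≤ end_.2 ∧ end_.2 < 3 then
    let dr := |end_.1 - start.1|
    let dc := |end_.2 - start.2|
    some (2 * max dr dc + min dr dc)
  else none

-- ===== PRECONDITION & SPEC =====
-- For starts off the 4x3 keypad that either equal the end or lie one step off the pad with the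
-- end on it, A's BFS still returns a move cost (0 or the travel cost); B returns None, the
-- intended result for an invalid start key.
def D_measure_distance (start : Int × Int) (end_ : Int × Int) : Prop :=
  ¬ (0 ≤ start.1 ∧ start.1 < 4 ∧ 0 ≤ start.2 ∧ start.2 < 3) ∧
  (start = end_ ∨
    ((0 ≤ end_.1 ∧ end_.1 < 4 ∧ 0 ≤ end_.2 ∧ end_.2 < 3) ∧
     (-1 ≤ start.1 ∧ start.1 ≤ 4 ∧ -1 ≤ start.2 ∧ start.2 ≤ 3)))
instance (start : Int × Int) (end_ : Int × Int) : Decidable (D_measure_distance start end_) := by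
  unfold D_measure_distance; infer_instance

def Spec_measure_distance (start : Int × Int) (end_ : Int × Int) (out : Option Int) : Prop :=
  ¬ D_measure_distance start end_ → out = measure_distance_alt start end_
instance (start : Int × Int) (end_ : Int × Int) (out : Option Int) : Decidable (Spec_measure_distance start end_ out) := by
  unfold Spec_measure_distance; infer_instance

def pvDiffWitness_measure_distance : (Int × Int) × (Int × Int) := ((-1, 0), (0, 0))
def pvDiffWitnessOut_measure_distance : (Option Int) × (Option Int) := (some 2, none)

-- ===== CLAIM (what is proved, stated in full; the proofs are below) =====
def Claim_unchanged_measure_distance : Prop := ∀ (start : Int × Int) (end_ : Int × Int), Dom_measure_distance start end_ → Spec_measure_distance start end_ (measure_distance start end_)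
def Claim_changed_measure_distance : Prop := Dom_measure_distance (pvDiffWitness_measure_distance.1) (pvDiffWitness_measure_distance.2) ∧ D_measure_distance (pvDiffWitness_measure_distance.1) (pvDiffWitness_measure_distance.2) ∧ measure_distance (pvDiffWitness_measure_distance.1) (pvDiffWitness_measure_distance.2) = pvDiffWitnessOut_measure_distance.1 ∧ measure_distance_alt (pvDiffWitness_measure_distance.1) (pvDiffWitness_measure_distance.2) = pvDiffWitnessOut_measure_distance.2 ∧ pvDiffWitnessOut_measure_distance.1 ≠ pvDiffWitnessOut_measure_distance.2
def Claim_exact_measure_distance : Prop := ∀ (start : Int × Int) (end_ : Int × Int), Dom_measure_distance start end_ → D_measure_distance start end_ → measure_distance start end_ ≠ measure_distance_alt start end_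

-- ===== LEMMAS AND PROOFS =====

-- the 12 keypad cells
def pvGrid12 : List (Int × Int) :=
  [(0,0),(0,1),(0,2),(1,0),(1,1),(1,2),(2,0),(2,1),(2,2),(3,0),(3,1),(3,2)]
-- the 18 cells one step off the keypad (Chebyshev distance exactly 1 from the pad)
def pvRing18 : List (Int × Int) :=
  [(-1,-1),(-1,0),(-1,1),(-1,2),(-1,3),(0,-1),(0,3),(1,-1),(1,3),(2,-1),(2,3),(3,-1),(3,3),
   (4,-1),(4,0),(4,1),(4,2),(4,3)]

set_option maxHeartbeats 1000000 in
lemma mem_pvGrid12 (p : Int × Int) :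
    p ∈ pvGrid12 ↔ 0 ≤ p.1 ∧ p.1 < 4 ∧ 0 ≤ p.2 ∧ p.2 < 3 := by
  obtain ⟨a, b⟩ := p
  constructor
  · intro h; fin_cases h <;> decide
  · rintro ⟨h1, h2, h3, h4⟩
    interval_cases a <;> interval_cases b <;> decide

set_option maxHeartbeats 1000000 in
lemma mem_pvRing18 (p : Int × Int)
    (hb : -1 ≤ p.1 ∧ p.1 ≤ 4 ∧ -1 ≤ p.2 ∧ p.2 ≤ 3)
    (hg : ¬ (0 ≤ p.1 ∧ p.1 < 4 ∧ 0 ≤ p.2 ∧ p.2 < 3)) : p ∈ pvRing18 := by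
  obtain ⟨a, b⟩ := p
  obtain ⟨h1, h2, h3, h4⟩ := hb
  revert hg
  interval_cases a <;> interval_cases b <;> decide

-- mdStep invariants: cells stay on the pad, visited stays Nodup, and each enqueue adds one visited cell
lemma mdStep_inv (x y dist : Int) (directions : List (Int × Int)) :
    ∀ (q : List ((Int × Int) × Int)) (visited : PySem.Set (Int × Int)),
    (∀ c ∈ q, c.1 ∈ pvGrid12) → (∀ v ∈ visited, v ∈ pvGrid12) → visited.Nodup →
    (∀ c ∈ (mdStep x y dist q visited directions).1, c.1 ∈ pvGrid12) ∧
    (∀ v ∈ (mdStep x y dist q visited directions).2, v ∈ pvGrid12) ∧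
    (mdStep x y dist q visited directions).2.Nodup ∧
    (mdStep x y dist q visited directions).1.length + visited.length =
      q.length + (mdStep x y dist q visited directions).2.length := by
  induction directions with
  | nil => intro q visited hq hv hnd; exact ⟨hq, hv, hnd, by simp [mdStep]⟩
  | cons d ds ih =>
      intro q visited hq hv hnd
      by_cases hc : 0 ≤ x + d.1 ∧ x + d.1 < 4 ∧ 0 ≤ y + d.2 ∧ y + d.2 < 3 ∧
          ¬ (PySem.Set.contains visited (x + d.1, y + d.2) = true)
      · have hstep : mdStep x y dist q visited (d :: ds) =
            mdStep x y dist
              (q ++ [((x + d.1, y + d.2), dist + (if d ∈ pvDiagonal then 3 else 2))])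
              (PySem.Set.add visited (x + d.1, y + d.2)) ds := by
          simp only [mdStep, List.foldl_cons, if_pos hc]
        rw [hstep]
        have hmem : (x + d.1, y + d.2) ∈ pvGrid12 := by
          rw [mem_pvGrid12]; exact ⟨hc.1, hc.2.1, hc.2.2.1, hc.2.2.2.1⟩
        have hq' : ∀ c ∈ q ++ [((x + d.1, y + d.2), dist + (if d ∈ pvDiagonal then 3 else 2))],
            c.1 ∈ pvGrid12 := by
          intro c hcm
          rcases List.mem_append.mp hcm with h | h
          · exact hq c h
          · simp at h; subst h; exact hmem
        have hv' : ∀ v ∈ PySem.Set.add visited (x + d.1, y + d.2), v ∈ pvGrid12 := by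
          intro v hvm
          rcases (PySem.Set.mem_add _ _ _).mp hvm with h | h
          · exact hv v h
          · subst h; exact hmem
        have hnd' : (PySem.Set.add visited (x + d.1, y + d.2)).Nodup :=
          PySem.Set.nodup_add _ _ hnd
        obtain ⟨a1, a2, a3, a4⟩ := ih _ _ hq' hv' hnd'
        refine ⟨a1, a2, a3, ?_⟩
        have hnotin : (x + d.1, y + d.2) ∉ visited := by
          intro hmemv
          exact hc.2.2.2.2 ((PySem.Set.contains_iff _ _).mpr hmemv)
        have hlen : (PySem.Set.add visited (x + d.1, y + d.2)).length = visited.length + 1 := by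
          simp [PySem.Set.add, hnotin]
        simp [hlen] at a4 ⊢
        omega
      · have hstep : mdStep x y dist q visited (d :: ds) = mdStep x y dist q visited ds := by
          simp only [mdStep, List.foldl_cons, if_neg hc]
        rw [hstep]; exact ih q visited hq hv hnd

lemma visited_card_le (visited : PySem.Set (Int × Int))
    (hv : ∀ v ∈ visited, v ∈ pvGrid12) (hnd : visited.Nodup) : visited.length ≤ 12 := by
  have h1 : visited.toFinset.card = visited.length := List.toFinset_card_of_nodup hnd
  have h2 : visited.toFinset ⊆ pvGrid12.toFinset := by
    intro v hvm
    rw [List.mem_toFinset] at hvm ⊢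
    exact hv v hvm
  have h3 := Finset.card_le_card h2
  have h4 : pvGrid12.toFinset.card ≤ 12 := by decide
  omega

-- the loop returns none whenever the target is off the pad and every queued cell is on it
lemma mdLoop_none (e : Int × Int) (he : ¬ (0 ≤ e.1 ∧ e.1 < 4 ∧ 0 ≤ e.2 ∧ e.2 < 3)) :
    ∀ (fuel : Nat) (q : List ((Int × Int) × Int)) (visited : PySem.Set (Int × Int)),
    (∀ c ∈ q, c.1 ∈ pvGrid12) → (∀ v ∈ visited, v ∈ pvGrid12) → visited.Nodup →
    q.length + 12 ≤ fuel + visited.length →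
    mdLoop e fuel q visited = none := by
  intro fuel
  induction fuel with
  | zero => intro q visited _ _ _ _; rfl
  | succ n ih =>
      intro q visited hq hv hnd hfuel
      match q with
      | [] => rfl
      | ((x, y), dist) :: rest =>
        have hxy : (x, y) ∈ pvGrid12 := hq _ (List.mem_cons_self ..)
        have hne : (x, y) ≠ e := by
          intro h; rw [h] at hxy; exact he ((mem_pvGrid12 e).mp hxy)
        have hrest : ∀ c ∈ rest, c.1 ∈ pvGrid12 := fun c hc => hq c (List.mem_cons_of_mem _ hc)
        simp only [mdLoop, if_neg hne]
        obtain ⟨a1, a2, a3, a4⟩ := mdStep_inv x y dist _ rest visited hrest hv hnd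
        apply ih _ _ a1 a2 a3
        have := visited_card_le _ a2 a3
        simp at hfuel
        omega

-- one unfolding of the loop when the start is strictly more than one step off the pad:
-- no neighbour passes the grid filter, so the queue empties immediately
lemma measure_distance_far_none (s e : Int × Int)
    (hs : ¬ (-1 ≤ s.1 ∧ s.1 ≤ 4 ∧ -1 ≤ s.2 ∧ s.2 ≤ 3)) (hne : s ≠ e) :
    measure_distance s e = none := by
  obtain ⟨x, y⟩ := s
  have hstep : ∀ (ds : List (Int × Int)), (∀ d ∈ ds, d.1 ≥ -1 ∧ d.1 ≤ 1 ∧ d.2 ≥ -1 ∧ d.2 ≤ 1) →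
      mdStep x y 0 [] PySem.Set.empty ds = ([], PySem.Set.empty) := by
    intro ds hds
    induction ds with
    | nil => rfl
    | cons d rest ih =>
        have hd := hds d (List.mem_cons_self ..)
        have hcond : ¬ (0 ≤ x + d.1 ∧ x + d.1 < 4 ∧ 0 ≤ y + d.2 ∧ y + d.2 < 3 ∧
            ¬ (PySem.Set.contains PySem.Set.empty (x + d.1, y + d.2) = true)) := by
          intro h
          apply hs
          refine ⟨by omega, by omega, by omega, by omega⟩
        simp only [mdStep, List.foldl_cons, if_neg hcond]
        exact ih (fun d hd => hds d (List.mem_cons_of_mem _ hd))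
  simp only [measure_distance, mdLoop, if_neg hne]
  rcases lt_trichotomy x e.1 with h | h | h
  · rw [if_neg (by omega), if_pos h, hstep _ (by decide)]; rfl
  · rw [if_pos h, hstep _ (by decide)]; rfl
  · rw [if_neg (by omega), if_neg (by omega), hstep _ (by decide)]; rfl

-- when the target is off the pad (and start ≠ end), the BFS exhausts and returns none
lemma measure_distance_off_target_none (s e : Int × Int)
    (he : ¬ (0 ≤ e.1 ∧ e.1 < 4 ∧ 0 ≤ e.2 ∧ e.2 < 3)) (hne : s ≠ e) :
    measure_distance s e = none := by
  obtain ⟨x, y⟩ := s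
  simp only [measure_distance, mdLoop, if_neg hne]
  have hempty1 : ∀ v ∈ (PySem.Set.empty : PySem.Set (Int × Int)), v ∈ pvGrid12 := by
    intro v hv; simp [PySem.Set.empty] at hv
  have hnil : ∀ c ∈ ([] : List ((Int × Int) × Int)), c.1 ∈ pvGrid12 := by intro c hc; simp at hc
  set ds : List (Int × Int) :=
    if x = e.1 then [(0, 1), (0, -1)]
    else if x < e.1 then [(1, 0), (1, 1), (1, -1)]
    else [(-1, 0), (-1, 1), (-1, -1)] with hds
  obtain ⟨a1, a2, a3, a4⟩ := mdStep_inv x y 0 ds [] PySem.Set.empty hnil hempty1 (by simp [PySem.Set.empty])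
  apply mdLoop_none e he 19 _ _ a1 a2 a3
  have := visited_card_le _ a2 a3
  rw [show (PySem.Set.empty : PySem.Set (Int × Int)).length = 0 from rfl] at a4
  simp only [List.length_nil] at a4
  omega

-- start == end returns 0 immediately, whatever the cells are
lemma measure_distance_self (s : Int × Int) : measure_distance s s = some 0 := by
  obtain ⟨x, y⟩ := s
  simp [measure_distance, mdLoop]

-- the finite checks, decided cell by cell
lemma check_grid :
    (pvGrid12.all fun s => pvGrid12.all fun e =>
      measure_distance s e == measure_distance_alt s e) = true := by decide

lemma check_ring :
    (pvRing18.all fun s => pvGrid12.all fun e =>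
      (s == e) || (measure_distance s e).isSome) = true := by decide

lemma grid_eq (s e : Int × Int) (hs : s ∈ pvGrid12) (he : e ∈ pvGrid12) :
    measure_distance s e = measure_distance_alt s e := by
  have h1 := List.all_eq_true.mp check_grid s hs
  have h2 := List.all_eq_true.mp h1 e he
  exact eq_of_beq h2

lemma ring_isSome (s e : Int × Int) (hs : s ∈ pvRing18) (he : e ∈ pvGrid12) (hne : s ≠ e) :
    (measure_distance s e).isSome = true := by
  have h1 := List.all_eq_true.mp check_ring s hs
  have h2 := List.all_eq_true.mp h1 e he
  rcases Bool.or_eq_true_iff.mp h2 with h | h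
  · exact absurd (eq_of_beq h) hne
  · exact h

-- ===== VERDICT (by name: the statement is the Claim_ definition above) =====
theorem measure_distance_spec : Claim_unchanged_measure_distance := by
  intro s e _ hnD
  unfold D_measure_distance at hnD
  by_cases hgs : 0 ≤ s.1 ∧ s.1 < 4 ∧ 0 ≤ s.2 ∧ s.2 < 3
  · by_cases hge : 0 ≤ e.1 ∧ e.1 < 4 ∧ 0 ≤ e.2 ∧ e.2 < 3
    · exact grid_eq s e ((mem_pvGrid12 s).mpr hgs) ((mem_pvGrid12 e).mpr hge)
    · have hne : s ≠ e := by intro h; subst h; exact hge hgs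
      rw [measure_distance_off_target_none s e hge hne]
      simp only [measure_distance_alt]
      rw [if_neg (by tauto)]
  · have hne : s ≠ e := fun h => hnD ⟨hgs, Or.inl h⟩
    have halt : measure_distance_alt s e = none := by
      simp only [measure_distance_alt]; rw [if_neg (by tauto)]
    rw [halt]
    by_cases hge : 0 ≤ e.1 ∧ e.1 < 4 ∧ 0 ≤ e.2 ∧ e.2 < 3
    · have hnband : ¬ (-1 ≤ s.1 ∧ s.1 ≤ 4 ∧ -1 ≤ s.2 ∧ s.2 ≤ 3) :=
        fun hb => hnD ⟨hgs, Or.inr ⟨hge, hb⟩⟩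
      exact measure_distance_far_none s e hnband hne
    · exact measure_distance_off_target_none s e hge hne

theorem measure_distance_changed : Claim_changed_measure_distance := by
  unfold Claim_changed_measure_distance; decide

theorem measure_distance_tight : Claim_exact_measure_distance := by
  intro s e _ hD
  obtain ⟨hgs, hcase⟩ := hD
  have halt : measure_distance_alt s e = none := by
    simp only [measure_distance_alt]; rw [if_neg (by tauto)]
  rw [halt]
  rcases hcase with h | ⟨hge, hband⟩
  · subst h; rw [measure_distance_self]; simp
  · by_cases hne : s = e
    · subst hne; rw [measure_distance_self]; simp
    · have hs18 : s ∈ pvRing18 := mem_pvRing18 s hband hgs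
      have := ring_isSome s e hs18 ((mem_pvGrid12 e).mpr hge) hne
      intro h; rw [h] at this; simp at this
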